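-- pv_equiv track=rewrite | github.com/X-Seti/Img-Factory-1.3-source | apps/methods/string_utility.py | unpack_ulong
-- ===== SOURCE A (Python) =====
-- def unpack_ulong(byte_str, little_endian=True): #vers 1
--     """
--     Unpack a 4-byte string as an unsigned long integer.
--     """
--     if len(byte_str) < 4:
--         return 0
--     byte_values = [ord(c) if isinstance(c, str) else c for c in byte_str[:4]]
--     if little_endian:
--         return byte_values[0] | (byte_values[1] << 8) | (byte_values[2] << 16) | (byte_values[3] << 24)
--     else:
--         return byte_values[3] | (byte_values[2] << 8) | (byte_values[1] << 16) | (byte_values[0] << 24)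
-- ===== SOURCE B (Python) =====
-- def unpack_ulong(byte_str, little_endian=True): #vers 1
--     """
--     Unpack a 4-byte string as an unsigned long integer.
--     """
--     if len(byte_str) < 4:
--         return 0
--     byte_values = [ord(c) if isinstance(c, str) else c for c in byte_str[:4]]
--     if little_endian:
--         byte_values.reverse()
--     result = 0
--     for b in byte_values:
--         result = (result << 8) | b
--     return result
-- ===== Notes on version B (the rewrite author's own statement) =====
-- stated objective: alternative
-- what changed: Replaces A's four hardcoded shift-OR terms (separate index expressions per endianness) by a single Horner-style fold that shifts the accumulator left by 8 and ORs in each byte, reversing the byte list first for little-endian.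
import Mathlib
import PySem

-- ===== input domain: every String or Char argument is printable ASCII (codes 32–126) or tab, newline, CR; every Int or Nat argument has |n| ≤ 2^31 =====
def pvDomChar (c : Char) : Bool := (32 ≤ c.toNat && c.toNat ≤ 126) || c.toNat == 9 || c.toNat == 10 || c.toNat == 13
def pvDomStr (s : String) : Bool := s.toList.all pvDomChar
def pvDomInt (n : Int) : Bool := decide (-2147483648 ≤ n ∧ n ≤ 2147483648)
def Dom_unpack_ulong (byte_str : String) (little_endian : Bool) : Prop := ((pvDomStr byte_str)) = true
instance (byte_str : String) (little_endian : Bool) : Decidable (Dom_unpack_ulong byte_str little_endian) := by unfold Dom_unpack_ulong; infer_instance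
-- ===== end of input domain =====

-- B replaces A's four hardcoded shift-OR terms by a Horner-style fold (result << 8) | b over the
-- endianness-ordered byte list: a different decomposition, same cost.

-- ===== PORT A =====
def unpack_ulong (byte_str : String) (little_endian : Bool) : Int :=
  if PySem.Str.len byte_str < 4 then 0
  else
    -- byte_values = [ord(c) for c in byte_str[:4]] (every element of a str is a str, so the ord branch)
    let byte_values : List Int :=
      (PySem.List.slice byte_str.toList none (some 4)).map (fun c => (c.toNat : Int))
    if little_endian then
      PySem.Int.bor (PySem.Int.bor (PySem.Int.bor (PySem.List.pyGetD byte_values 0 0)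
        ((PySem.List.pyGetD byte_values 1 0) <<< (8:Nat))) ((PySem.List.pyGetD byte_values 2 0) <<< (16:Nat)))
        ((PySem.List.pyGetD byte_values 3 0) <<< (24:Nat))
    else
      PySem.Int.bor (PySem.Int.bor (PySem.Int.bor (PySem.List.pyGetD byte_values 3 0)
        ((PySem.List.pyGetD byte_values 2 0) <<< (8:Nat))) ((PySem.List.pyGetD byte_values 1 0) <<< (16:Nat)))
        ((PySem.List.pyGetD byte_values 0 0) <<< (24:Nat))

-- ===== PORT B =====
def unpack_ulong_alt (byte_str : String) (little_endian : Bool) : Int :=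
  if PySem.Str.len byte_str < 4 then 0
  else
    let byte_values : List Int :=
      (PySem.List.slice byte_str.toList none (some 4)).map (fun c => (c.toNat : Int))
    let ordered := if little_endian then byte_values.reverse else byte_values
    ordered.foldl (fun result b => PySem.Int.bor (result <<< (8:Nat)) b) 0

-- ===== PRECONDITION & SPEC =====
def Spec_unpack_ulong (byte_str : String) (little_endian : Bool) (out : Int) : Prop := out = unpack_ulong_alt byte_str little_endian
instance (byte_str : String) (little_endian : Bool) (out : Int) : Decidable (Spec_unpack_ulong byte_str little_endian out) := by unfold Spec_unpack_ulong; infer_instance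

-- ===== CLAIM (what is proved, stated in full; the proofs are below) =====
def Claim_equal_unpack_ulong : Prop := ∀ (byte_str : String) (little_endian : Bool), Dom_unpack_ulong byte_str little_endian → Spec_unpack_ulong byte_str little_endian (unpack_ulong byte_str little_endian)

-- ===== LEMMAS AND PROOFS =====

-- four-byte OR with disjoint shifts is order-insensitive (pure bitwise rearrangement)
theorem pv_natkey (a b c d : Nat) :
    a ||| b <<< 8 ||| c <<< 16 ||| d <<< 24
      = (((d <<< 8 ||| c) <<< 8 ||| b) <<< 8 ||| a) := by
  simp only [Nat.shiftLeft_or_distrib, ← Nat.shiftLeft_add]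
  norm_num
  generalize b <<< 8 = x
  generalize c <<< 16 = y
  generalize d <<< 24 = z
  ac_rfl

-- B's Horner fold over four bytes equals A's unrolled shift-OR expression
theorem pv_horner4 (a b c d : Nat) :
    ([((d:Int)), (c:Int), (b:Int), (a:Int)].foldl (fun r x => PySem.Int.bor (r <<< (8:Nat)) x) 0)
      = PySem.Int.bor (PySem.Int.bor (PySem.Int.bor (a:Int) ((b:Int) <<< (8:Nat))) ((c:Int) <<< (16:Nat))) ((d:Int) <<< (24:Nat)) := by
  have hsh : ∀ (n k : Nat), ((n:Int) <<< k) = ((n <<< k : Nat) : Int) := fun _ _ => rfl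
  have h0 : ((0:Int)) = ((0:Nat):Int) := by norm_num
  simp only [List.foldl, h0, hsh, PySem.Int.bor_natCast, Nat.cast_inj]
  simp only [Nat.zero_shiftLeft, Nat.zero_or]
  exact (pv_natkey a b c d).symm

-- ===== VERDICT (by name: the statement is the Claim_ definition above) =====
theorem unpack_ulong_spec : Claim_equal_unpack_ulong := by
  intro s le _
  unfold Spec_unpack_ulong unpack_ulong unpack_ulong_alt
  rcases hl : s.toList with _ | ⟨a, _ | ⟨b, _ | ⟨c, _ | ⟨d, t⟩⟩⟩⟩ <;>
    simp [hl, PySem.List.slice_to, PySem.List.pyGetD_zero_cons]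
  have hfour : ¬((t.length : Int) + 1 + 1 + 1 + 1 < 4) := by omega
  simp only [if_neg hfour]
  simp only [PySem.List.pyGetD_ofNat', List.getD_cons_succ, List.getD_cons_zero]
  cases le with
  | true =>
      simp only [reduceIte]
      exact (pv_horner4 a.toNat b.toNat c.toNat d.toNat).symm
  | false =>
      simp only [Bool.false_eq_true, reduceIte]
      exact (pv_horner4 d.toNat c.toNat b.toNat a.toNat).symm
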